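-- pv_equiv track=rewrite | github.com/zreikalaa/l1-python | test.py | carre_croissant
-- ===== SOURCE A (Python) =====
-- def carre_croissant(n) :
--     liste2 = []
--     for i in range(1,n+1):
--         liste = []
--         for j in range(i,i+n):
--             liste.append(j)
--         liste2.append(liste)
--     return liste2
-- ===== SOURCE B (Python) =====
-- def carre_croissant(n):
--     result = []
--     row = list(range(1, n + 1))
--     for _ in range(n):
--         result.append(row)
--         row = [x + 1 for x in row]
--     return result
-- ===== Notes on version B (the rewrite author's own statement) =====
-- stated objective: alternative
-- what changed: B maintains one running row and derives each successive row by incrementing every element of the previous one, instead of A's building every row independently with an inner range loop.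
import Mathlib
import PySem

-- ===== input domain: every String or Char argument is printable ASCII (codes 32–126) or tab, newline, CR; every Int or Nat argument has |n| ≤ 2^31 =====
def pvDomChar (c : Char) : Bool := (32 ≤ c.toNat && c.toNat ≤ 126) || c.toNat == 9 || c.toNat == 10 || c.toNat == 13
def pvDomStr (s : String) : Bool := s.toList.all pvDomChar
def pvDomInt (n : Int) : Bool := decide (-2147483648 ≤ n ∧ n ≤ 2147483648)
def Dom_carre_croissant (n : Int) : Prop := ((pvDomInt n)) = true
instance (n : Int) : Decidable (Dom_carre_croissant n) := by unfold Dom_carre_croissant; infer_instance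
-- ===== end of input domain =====

-- B maintains one running row, deriving each row from the previous by incrementing every element, instead of
-- rebuilding each row with an inner range loop; same cost, different decomposition.

-- ===== PORT A =====
def carre_croissant (n : Int) : List (List Int) :=
  (PySem.List.pyRange 1 (n + 1) 1).foldl
    (fun liste2 i =>
      liste2 ++ [(PySem.List.pyRange i (i + n) 1).foldl (fun liste j => liste ++ [j]) []])
    []

-- ===== PORT B =====
def carre_croissant_altLoop (result : List (List Int)) (row : List Int) : Nat → List (List Int)
  | 0 => result
  | k + 1 => carre_croissant_altLoop (result ++ [row]) (row.map (· + 1)) k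

def carre_croissant_alt (n : Int) : List (List Int) :=
  carre_croissant_altLoop [] (PySem.List.pyRange 1 (n + 1) 1) n.toNat

-- ===== PRECONDITION & SPEC =====
def Spec_carre_croissant (n : Int) (out : List (List Int)) : Prop := out = carre_croissant_alt n
instance (n : Int) (out : List (List Int)) : Decidable (Spec_carre_croissant n out) := by unfold Spec_carre_croissant; infer_instance

-- ===== CLAIM (what is proved, stated in full; the proofs are below) =====
def Claim_equal_carre_croissant : Prop := ∀ (n : Int), Dom_carre_croissant n → Spec_carre_croissant n (carre_croissant n)

-- ===== LEMMAS AND PROOFS =====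

theorem pv_foldl_snoc {α : Type} (l : List α) (acc : List α) :
    l.foldl (fun a j => a ++ [j]) acc = acc ++ l := by
  induction l generalizing acc with
  | nil => simp
  | cons x xs ih => simp [List.foldl, ih]

theorem pv_foldl_snoc_map {α β : Type} (l : List α) (f : α → β) (acc : List β) :
    l.foldl (fun a i => a ++ [f i]) acc = acc ++ l.map f := by
  induction l generalizing acc with
  | nil => simp
  | cons x xs ih => simp [List.foldl, ih]

theorem pv_map_add_one_pyRange (a b : Int) :
    (PySem.List.pyRange a b 1).map (· + 1) = PySem.List.pyRange (a + 1) (b + 1) 1 := by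
  simp only [PySem.List.pyRange_one, List.map_map]
  have : b + 1 - (a + 1) = b - a := by ring
  rw [this]
  apply List.map_congr_left
  intro k _
  simp; ring

theorem pv_altLoop_eq (n : Int) (k : Nat) (s : Int) (acc : List (List Int)) :
    carre_croissant_altLoop acc (PySem.List.pyRange s (s + n) 1) k
      = acc ++ (PySem.List.pyRange s (s + (k : Int)) 1).map
          (fun i => PySem.List.pyRange i (i + n) 1) := by
  induction k generalizing s acc with
  | zero => simp [carre_croissant_altLoop, PySem.List.pyRange_one_eq_nil (le_refl s)]
  | succ k ih =>
    have hlt : s < s + ((k : Int) + 1) := by omega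
    rw [carre_croissant_altLoop, pv_map_add_one_pyRange]
    have hs : s + n + 1 = (s + 1) + n := by ring
    rw [hs, ih (s + 1)]
    have : s + ((k : Int) + 1) = (s + 1) + (k : Int) := by ring
    rw [show ((k + 1 : Nat) : Int) = (k : Int) + 1 by push_cast; ring,
        PySem.List.pyRange_one_cons hlt, this]
    simp

theorem carre_croissant_spec' (n : Int) :
    carre_croissant n = carre_croissant_alt n := by
  unfold carre_croissant carre_croissant_alt
  rw [pv_foldl_snoc_map]
  simp only [List.nil_append]
  rcases (by omega : n ≤ 0 ∨ 0 < n) with h | h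
  · have h0 : n.toNat = 0 := by omega
    rw [h0, PySem.List.pyRange_one_eq_nil (by omega : n + 1 ≤ 1)]
    simp [carre_croissant_altLoop]
  · have h1 : n + 1 = 1 + n := by ring
    rw [h1, pv_altLoop_eq n n.toNat 1]
    have : 1 + ((n.toNat : Int)) = 1 + n := by omega
    rw [this]
    apply List.map_congr_left
    intro i _
    exact (pv_foldl_snoc _ []).trans (by simp)

-- ===== VERDICT (by name: the statement is the Claim_ definition above) =====
theorem carre_croissant_spec : Claim_equal_carre_croissant := by
  intro n _
  unfold Spec_carre_croissant
  exact carre_croissant_spec' n
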